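-- pv_equiv track=rewrite | github.com/Yobretaw/AlgorithmProblems | EPI/Heap/11_7_compute_fair_bonuses.py | compute_fair_bonus
-- ===== SOURCE A (Python) =====
-- def compute_fair_bonus(arr):
--     n = len(arr)
--     if n < 2:
--         return n
--
--     counts = [1] * n
--     for i in range(1, n):
--         if arr[i] > arr[i - 1]:
--             counts[i] = counts[i - 1] + 1
--
--     for i in reversed(range(0, n - 1)):
--         if arr[i] > arr[i + 1] and counts[i] <= counts[i + 1]:
--             counts[i] = counts[i + 1] + 1
--
--     return sum(counts)
-- ===== SOURCE B (Python) =====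
-- def compute_fair_bonus(arr):
--     n = len(arr)
--     if n < 2:
--         return n
--     total = 1
--     up = down = peak = 0
--     for prev, cur in zip(arr, arr[1:]):
--         if cur > prev:
--             up += 1
--             down = 0
--             peak = up
--             total += up + 1
--         elif cur < prev:
--             up = 0
--             down += 1
--             total += down + (1 if down > peak else 0)
--         else:
--             up = down = peak = 0
--             total += 1
--     return total
-- ===== Notes on version B (the rewrite author's own statement) =====
-- stated objective: alternative
-- what changed: Replaces the two-pass counts-array algorithm with a single left-to-right slope scan that maintains ascending/descending run lengths and the last peak height, accumulating the total in O(1) extra space.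
import Mathlib
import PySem

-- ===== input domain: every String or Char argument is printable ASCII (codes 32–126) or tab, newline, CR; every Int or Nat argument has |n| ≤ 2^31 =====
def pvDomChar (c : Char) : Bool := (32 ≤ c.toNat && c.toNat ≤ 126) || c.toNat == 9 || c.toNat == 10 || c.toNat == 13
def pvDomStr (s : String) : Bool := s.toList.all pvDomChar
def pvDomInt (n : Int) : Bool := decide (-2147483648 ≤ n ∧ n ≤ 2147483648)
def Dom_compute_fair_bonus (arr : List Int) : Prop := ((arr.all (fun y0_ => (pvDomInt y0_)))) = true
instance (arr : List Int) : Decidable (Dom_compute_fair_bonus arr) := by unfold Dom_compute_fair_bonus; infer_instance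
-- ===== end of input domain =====

-- B replaces A's two index passes over a counts array by a single left-to-right slope scan
-- keeping ascending/descending run lengths and the last peak height (O(1) extra space).

-- ===== PORT A =====
def compute_fair_bonus (arr : List Int) : Int :=
  let n : Int := arr.length
  if n < 2 then n
  else
    let counts : List Int := List.replicate arr.length 1
    let counts := (PySem.List.pyRange 1 n 1).foldl (fun counts i =>
      if PySem.List.pyGetD arr i 0 > PySem.List.pyGetD arr (i - 1) 0 then
        counts.set i.toNat (PySem.List.pyGetD counts (i - 1) 0 + 1)
      else counts) counts
    let counts := ((PySem.List.pyRange 0 (n - 1) 1).reverse).foldl (fun counts i =>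
      if PySem.List.pyGetD arr i 0 > PySem.List.pyGetD arr (i + 1) 0 ∧
         PySem.List.pyGetD counts i 0 ≤ PySem.List.pyGetD counts (i + 1) 0 then
        counts.set i.toNat (PySem.List.pyGetD counts (i + 1) 0 + 1)
      else counts) counts
    counts.sum

-- ===== PORT B =====
-- loop body of B's single scan: state (total, up, down, peak), pair (prev, cur)
def bStep (s : Int × Int × Int × Int) (p : Int × Int) : Int × Int × Int × Int :=
  let (total, up, down, peak) := s
  let (prev, cur) := p
  if cur > prev then
    (total + (up + 1) + 1, up + 1, 0, up + 1)
  else if cur < prev then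
    (total + (down + 1) + (if down + 1 > peak then 1 else 0), 0, down + 1, peak)
  else
    (total + 1, 0, 0, 0)

def compute_fair_bonus_alt (arr : List Int) : Int :=
  let n : Int := arr.length
  if n < 2 then n
  else
    ((arr.zip (PySem.List.slice arr (some 1) none)).foldl bStep (1, 0, 0, 0)).1

-- ===== PRECONDITION & SPEC =====
def Spec_compute_fair_bonus (arr : List Int) (out : Int) : Prop := out = compute_fair_bonus_alt arr
instance (arr : List Int) (out : Int) : Decidable (Spec_compute_fair_bonus arr out) := by unfold Spec_compute_fair_bonus; infer_instance

-- ===== CLAIM (what is proved, stated in full; the proofs are below) =====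
def Claim_equal_compute_fair_bonus : Prop := ∀ (arr : List Int), Dom_compute_fair_bonus arr → Spec_compute_fair_bonus arr (compute_fair_bonus arr)

-- ===== LEMMAS AND PROOFS =====
-- Common specification S: position i gets max(length of the strictly increasing run ending
-- at i, length of the strictly decreasing run starting at i); S sums these over the list.

def upsGo (prev u : Int) : List Int → List Int
  | [] => []
  | y :: ys => (if y > prev then u + 1 else 1) :: upsGo y (if y > prev then u + 1 else 1) ys
def desc (prev : Int) : List Int → Int
  | [] => 0
  | y :: ys => if y < prev then 1 + desc y ys else 0
def downs : List Int → List Int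
  | [] => []
  | x :: xs => (desc x xs + 1) :: downs xs
def J (prev u d pk : Int) (rest : List Int) : Int :=
  (List.zipWith max (upsGo prev (u + 1) rest) (downs rest)).sum
  + d * desc prev rest + max (pk + 1) (d + 1 + desc prev rest) - max (pk + 1) (d + 1)
lemma desc_nonneg (prev : Int) (l : List Int) : 0 ≤ desc prev l := by
  induction l generalizing prev with
  | nil => simp [desc]
  | cons y ys ih => simp only [desc]; split <;> [linarith [ih y]; simp]
lemma J_step (ys : List Int) (prev y u d pk : Int) (hu : 0 ≤ u) :
    J prev u d pk (y :: ys) =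
      if y > prev then (u + 2) + J y (u + 1) 0 (u + 1) ys
      else if y < prev then (d + 1 + (if d + 1 > pk then 1 else 0)) + J y 0 (d + 1) pk ys
      else 1 + J y 0 0 0 ys := by
  have ht' : 0 ≤ desc y ys := desc_nonneg y ys
  rcases lt_trichotomy prev y with h | h | h
  · simp only [J, upsGo, downs, desc, List.zipWith_cons_cons, List.sum_cons,
      if_pos h, if_neg (by omega : ¬ y < prev), gt_iff_lt]
    generalize (List.zipWith max (upsGo y (u + 1 + 1) ys) (downs ys)).sum = Z
    generalize desc y ys = t at ht' ⊢
    omega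
  · simp only [J, upsGo, downs, desc, List.zipWith_cons_cons, List.sum_cons,
      if_neg (by omega : ¬ y > prev), if_neg (by omega : ¬ y < prev), gt_iff_lt, zero_add]
    generalize (List.zipWith max (upsGo y 1 ys) (downs ys)).sum = Z
    generalize desc y ys = t at ht' ⊢
    omega
  · simp only [J, upsGo, downs, desc, List.zipWith_cons_cons, List.sum_cons,
      if_neg (by omega : ¬ y > prev), if_pos (by omega : y < prev), gt_iff_lt, zero_add]
    generalize (List.zipWith max (upsGo y 1 ys) (downs ys)).sum = Z
    have e1 : d * (1 + desc y ys) = d + d * desc y ys := by ring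
    have e2 : (d + 1) * desc y ys = d * desc y ys + desc y ys := by ring
    rw [e1, e2]
    generalize d * desc y ys = q
    generalize desc y ys = t at ht' ⊢
    split_ifs <;> omega
def ups : List Int → List Int
  | [] => []
  | x :: xs => 1 :: upsGo x 1 xs
def S (arr : List Int) : Int := (List.zipWith max (ups arr) (downs arr)).sum
def G (prev u d pk : Int) : List Int → Int
  | [] => 0
  | y :: ys =>
    if y > prev then (u + 2) + G y (u + 1) 0 (u + 1) ys
    else if y < prev then (d + 1 + (if d + 1 > pk then 1 else 0)) + G y 0 (d + 1) pk ys
    else 1 + G y 0 0 0 ys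
lemma G_eq_J (rest : List Int) (prev u d pk : Int) (hu : 0 ≤ u) :
    G prev u d pk rest = J prev u d pk rest := by
  induction rest generalizing prev u d pk with
  | nil => simp only [G, J, desc, upsGo, downs, List.zipWith_nil, List.sum_nil, mul_zero]; omega
  | cons y ys ih =>
    rw [J_step ys prev y u d pk hu]
    simp only [G]
    split_ifs <;> rw [ih] <;> omega

lemma foldl_bStep (rest : List Int) (prev t u d pk : Int) :
    (((prev :: rest).zip rest).foldl bStep (t, u, d, pk)).1 = t + G prev u d pk rest := by
  induction rest generalizing prev t u d pk with
  | nil => simp [G]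
  | cons y ys ih =>
    simp only [List.zip_cons_cons, List.foldl_cons, bStep, G]
    split_ifs with h1 h2 <;> rw [ih] <;> ring

lemma S_cons (a0 : Int) (rest : List Int) : S (a0 :: rest) = 1 + J a0 0 0 0 rest := by
  have ht : 0 ≤ desc a0 rest := desc_nonneg a0 rest
  simp only [S, J, ups, downs, List.zipWith_cons_cons, List.sum_cons, zero_add, zero_mul]
  generalize (List.zipWith max (upsGo a0 1 rest) (downs rest)).sum = Z
  generalize desc a0 rest = t at ht ⊢
  omega
lemma alt_eq_S (arr : List Int) : compute_fair_bonus_alt arr = S arr := by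
  match arr with
  | [] => simp [compute_fair_bonus_alt, S, ups, downs]
  | [x] => simp [compute_fair_bonus_alt, S, ups, downs, upsGo, desc]
  | a0 :: a1 :: rest =>
    have hlen : ¬ ((((a0 :: a1 :: rest).length : Int)) < 2) := by
      simp only [List.length_cons]; push_cast; omega
    simp only [compute_fair_bonus_alt, if_neg hlen, PySem.List.slice_from_one, List.tail_cons]
    rw [foldl_bStep (a1 :: rest) a0 1 0 0 0, G_eq_J _ _ _ _ _ (le_refl 0), ← S_cons]
lemma length_upsGo (l : List Int) : ∀ (prev u : Int), (upsGo prev u l).length = l.length := by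
  induction l with
  | nil => intro _ _; rfl
  | cons y ys ih => intro prev u; simp [upsGo, ih]

lemma length_ups (l : List Int) : (ups l).length = l.length := by
  cases l with
  | nil => rfl
  | cons x xs => simp [ups, length_upsGo]

lemma length_downs (l : List Int) : (downs l).length = l.length := by
  induction l with
  | nil => rfl
  | cons x xs ih => simp [downs, ih]

lemma upsGo_getD_succ (l : List Int) : ∀ (prev u : Int) (k : Nat), k + 1 < l.length →
    (upsGo prev u l).getD (k + 1) 0 =
      if l.getD (k + 1) 0 > l.getD k 0 then (upsGo prev u l).getD k 0 + 1 else 1 := by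
  induction l with
  | nil => intro _ _ k h; simp at h
  | cons y ys ih =>
    intro prev u k h
    cases k with
    | zero =>
      match ys, h with
      | z :: zs, _ => simp [upsGo]
    | succ k =>
      simp only [upsGo, List.getD_cons_succ]
      exact ih y _ k (by simpa using h)

lemma ups_getD_succ (arr : List Int) (k : Nat) (h : k + 1 < arr.length) :
    (ups arr).getD (k + 1) 0 =
      if arr.getD (k + 1) 0 > arr.getD k 0 then (ups arr).getD k 0 + 1 else 1 := by
  cases arr with
  | nil => simp at h
  | cons x xs =>
    cases k with
    | zero =>
      match xs, h with
      | z :: zs, _ => simp [ups, upsGo]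
    | succ k =>
      simp only [ups, List.getD_cons_succ]
      exact upsGo_getD_succ xs x 1 k (by simpa using h)

lemma upsGo_getD_pos (l : List Int) : ∀ (prev u : Int), 0 ≤ u → ∀ (k : Nat), k < l.length →
    1 ≤ (upsGo prev u l).getD k 0 := by
  induction l with
  | nil => intro _ _ _ k h; simp at h
  | cons y ys ih =>
    intro prev u hu k hk
    cases k with
    | zero => simp only [upsGo, List.getD_cons_zero]; split <;> omega
    | succ k =>
      simp only [upsGo, List.getD_cons_succ]
      exact ih y _ (by split <;> omega) k (by simpa using hk)

lemma ups_getD_pos (arr : List Int) (k : Nat) (h : k < arr.length) : 1 ≤ (ups arr).getD k 0 := by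
  cases arr with
  | nil => simp at h
  | cons x xs =>
    cases k with
    | zero => simp [ups]
    | succ k => simpa [ups] using upsGo_getD_pos xs x 1 (by omega) k (by simpa using h)

lemma downs_getD_pos (arr : List Int) (k : Nat) (h : k < arr.length) : 1 ≤ (downs arr).getD k 0 := by
  induction arr generalizing k with
  | nil => simp at h
  | cons x xs ih =>
    cases k with
    | zero => have := desc_nonneg x xs; simp only [downs, List.getD_cons_zero]; omega
    | succ k => simp only [downs, List.getD_cons_succ]; exact ih k (by simpa using h)

lemma downs_getD_succ (arr : List Int) (k : Nat) (h : k + 1 < arr.length) :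
    (downs arr).getD k 0 =
      if arr.getD k 0 > arr.getD (k + 1) 0 then (downs arr).getD (k + 1) 0 + 1 else 1 := by
  induction arr generalizing k with
  | nil => simp at h
  | cons x xs ih =>
    cases k with
    | zero =>
      match xs, h with
      | z :: zs, _ =>
        simp only [downs, desc, List.getD_cons_zero, List.getD_cons_succ, gt_iff_lt]
        split_ifs <;> omega
    | succ k =>
      simp only [downs, List.getD_cons_succ]
      exact ih k (by simpa using h)

lemma downs_getD_last (arr : List Int) (h : arr ≠ []) :
    (downs arr).getD (arr.length - 1) 0 = 1 := by
  induction arr with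
  | nil => simp at h
  | cons x xs ih =>
    cases xs with
    | nil => simp [downs, desc]
    | cons z zs =>
      have := ih (by simp)
      simpa [downs, List.getD_cons_succ] using this
lemma getD_set' (l : List Int) (i j : Nat) (v : Int) :
    (l.set i v).getD j 0 = if j = i ∧ i < l.length then v else l.getD j 0 := by
  simp only [List.getD_eq_getElem?_getD, List.getElem?_set]
  split_ifs with h1 h2 h3 <;> simp_all

-- A's first pass, parameterised by the upper bound of the index range
def pass1Fold (arr : List Int) (k : Int) : List Int :=
  (PySem.List.pyRange 1 k 1).foldl (fun counts i =>
    if PySem.List.pyGetD arr i 0 > PySem.List.pyGetD arr (i - 1) 0 then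
      counts.set i.toNat (PySem.List.pyGetD counts (i - 1) 0 + 1)
    else counts) (List.replicate arr.length 1)

-- A's second pass, parameterised by the (exclusive) upper bound of the reversed range
def pass2Fold (arr counts0 : List Int) (i : Int) : List Int :=
  ((PySem.List.pyRange 0 i 1).reverse).foldl (fun counts i =>
    if PySem.List.pyGetD arr i 0 > PySem.List.pyGetD arr (i + 1) 0 ∧
       PySem.List.pyGetD counts i 0 ≤ PySem.List.pyGetD counts (i + 1) 0 then
      counts.set i.toNat (PySem.List.pyGetD counts (i + 1) 0 + 1)
    else counts) counts0

lemma pass1_invariant (arr : List Int) (k : Nat) (h1 : 1 ≤ k) (hk : k ≤ arr.length) :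
    (pass1Fold arr k).length = arr.length ∧
    ∀ j : Nat, j < arr.length →
      (pass1Fold arr k).getD j 0 = if j < k then (ups arr).getD j 0 else 1 := by
  induction k with
  | zero => omega
  | succ k ih =>
    by_cases hk0 : k = 0
    · subst hk0
      have : PySem.List.pyRange 1 ((1 : Nat) : Int) 1 = [] :=
        PySem.List.pyRange_one_eq_nil (by norm_num)
      unfold pass1Fold
      rw [show (((1:Nat) : Int)) = (1 : Int) by norm_num] at *
      rw [this]
      refine ⟨by simp, ?_⟩
      intro j hj
      rw [List.foldl_nil, List.getD_replicate 1 hj]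
      split_ifs with hj1
      · have hj0 : j = 0 := by omega
        subst hj0
        match arr, hj with
        | x :: xs, _ => simp [ups]
      · rfl
    · have hk1 : 1 ≤ k := by omega
      obtain ⟨ihl, ihv⟩ := ih hk1 (by omega)
      have hsplit : PySem.List.pyRange 1 ((k + 1 : Nat) : Int) 1 =
          PySem.List.pyRange 1 (k : Int) 1 ++ [(k : Int)] := by
        have : (((k + 1 : Nat)) : Int) = (k : Int) + 1 := by push_cast; ring
        rw [this]
        exact PySem.List.pyRange_one_succ_right (by exact_mod_cast hk1)
      have hstep : pass1Fold arr ((k + 1 : Nat) : Int) =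
          (fun counts i =>
            if PySem.List.pyGetD arr i 0 > PySem.List.pyGetD arr (i - 1) 0 then
              counts.set i.toNat (PySem.List.pyGetD counts (i - 1) 0 + 1)
            else counts) (pass1Fold arr (k : Int)) (k : Int) := by
        unfold pass1Fold
        rw [hsplit, List.foldl_append, List.foldl_cons, List.foldl_nil]
      have hcast : ((k : Int) - 1) = ((k - 1 : Nat) : Int) := by omega
      have hget : PySem.List.pyGetD arr ((k : Int)) 0 = arr.getD k 0 := by
        simp [PySem.List.pyGetD_natCast]
      have hget' : PySem.List.pyGetD arr ((k : Int) - 1) 0 = arr.getD (k - 1) 0 := by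
        rw [hcast]; simp [PySem.List.pyGetD_natCast]
      have hgetc : PySem.List.pyGetD (pass1Fold arr (k : Int)) ((k : Int) - 1) 0 =
          (pass1Fold arr (k : Int)).getD (k - 1) 0 := by
        rw [hcast]; simp [PySem.List.pyGetD_natCast]
      have hrec := ups_getD_succ arr (k - 1) (by omega)
      rw [Nat.sub_add_cancel hk1] at hrec
      have hCk1 : (pass1Fold arr (k : Int)).getD (k - 1) 0 = (ups arr).getD (k - 1) 0 := by
        rw [ihv (k - 1) (by omega)]
        simp [show k - 1 < k by omega]
      rw [hstep]
      simp only [hget, hget', hgetc, Int.toNat_natCast, hCk1]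
      split_ifs with hc
      · constructor
        · simpa using ihl
        · intro j hj
          rw [getD_set', ihl]
          by_cases hjk : j = k
          · subst hjk
            rw [if_pos ⟨rfl, by omega⟩, if_pos (by omega : j < j + 1), hrec, if_pos hc]
          · rw [if_neg (by tauto), ihv j hj]
            split_ifs <;> first | rfl | omega
      · refine ⟨ihl, ?_⟩
        intro j hj
        by_cases hjk : j = k
        · subst hjk
          rw [ihv j hj, if_neg (by omega : ¬ j < j), if_pos (by omega : j < j + 1), hrec,
            if_neg hc]
        · rw [ihv j hj]
          split_ifs <;> first | rfl | omega
def M (arr : List Int) (j : Nat) : Int := max ((ups arr).getD j 0) ((downs arr).getD j 0)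

lemma pass2_invariant (arr : List Int) (i : Nat) : ∀ (C : List Int), i + 1 ≤ arr.length →
    C.length = arr.length →
    (∀ j : Nat, j < arr.length → C.getD j 0 = if i ≤ j then M arr j else (ups arr).getD j 0) →
    (pass2Fold arr C (i : Int)).length = arr.length ∧
    ∀ j : Nat, j < arr.length → (pass2Fold arr C (i : Int)).getD j 0 = M arr j := by
  induction i with
  | zero =>
    intro C _ hCl hCv
    have : PySem.List.pyRange 0 ((0 : Nat) : Int) 1 = [] :=
      PySem.List.pyRange_one_eq_nil (by norm_num)
    unfold pass2Fold
    rw [show (((0:Nat)) : Int) = (0 : Int) by norm_num] at *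
    rw [this]
    refine ⟨by simpa using hCl, ?_⟩
    intro j hj
    simpa using (hCv j hj).trans (by simp)
  | succ i ih =>
    intro C hin hCl hCv
    have hsplit : PySem.List.pyRange 0 ((i + 1 : Nat) : Int) 1 =
        PySem.List.pyRange 0 (i : Int) 1 ++ [(i : Int)] := by
      have : (((i + 1 : Nat)) : Int) = (i : Int) + 1 := by push_cast; ring
      rw [this]
      exact PySem.List.pyRange_one_succ_right (by positivity)
    have hstep : pass2Fold arr C ((i + 1 : Nat) : Int) =
        pass2Fold arr
          ((fun counts (t : Int) =>
            if PySem.List.pyGetD arr t 0 > PySem.List.pyGetD arr (t + 1) 0 ∧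
               PySem.List.pyGetD counts t 0 ≤ PySem.List.pyGetD counts (t + 1) 0 then
              counts.set t.toNat (PySem.List.pyGetD counts (t + 1) 0 + 1)
            else counts) C (i : Int)) (i : Int) := by
      unfold pass2Fold
      rw [hsplit, List.reverse_append, List.reverse_singleton, List.singleton_append,
        List.foldl_cons]
    have hcast : ((i : Int) + 1) = ((i + 1 : Nat) : Int) := by push_cast; ring
    have hgeta : PySem.List.pyGetD arr ((i : Int)) 0 = arr.getD i 0 := by
      simp [PySem.List.pyGetD_natCast]
    have hgeta' : PySem.List.pyGetD arr ((i : Int) + 1) 0 = arr.getD (i + 1) 0 := by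
      rw [hcast]; exact PySem.List.pyGetD_natCast ..
    have hgetc : PySem.List.pyGetD C ((i : Int)) 0 = C.getD i 0 := by
      simp [PySem.List.pyGetD_natCast]
    have hgetc' : PySem.List.pyGetD C ((i : Int) + 1) 0 = C.getD (i + 1) 0 := by
      rw [hcast]; exact PySem.List.pyGetD_natCast ..
    have hCi : C.getD i 0 = (ups arr).getD i 0 := by
      rw [hCv i (by omega)]; simp [show ¬ (i + 1 ≤ i) by omega]
    have hCi1 : C.getD (i + 1) 0 = M arr (i + 1) := by
      rw [hCv (i + 1) (by omega)]; simp
    have hU := ups_getD_succ arr i (by omega)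
    have hD := downs_getD_succ arr i (by omega)
    have hUp := ups_getD_pos arr i (by omega)
    have hUp1 := ups_getD_pos arr (i + 1) (by omega)
    have hDp1 := downs_getD_pos arr (i + 1) (by omega)
    rw [hstep]
    simp only [hgeta, hgeta', hgetc, hgetc', Int.toNat_natCast, hCi, hCi1]
    split_ifs with hc
    · -- set branch: arr[i] > arr[i+1] and ups i ≤ M (i+1)
      obtain ⟨ha, hle⟩ := hc
      have hU1 : (ups arr).getD (i + 1) 0 = 1 := by rw [hU, if_neg (by omega)]
      apply ih
      · omega
      · simpa using hCl
      · intro j hj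
        rw [getD_set', hCl]
        by_cases hjk : j = i
        · subst hjk
          rw [if_pos ⟨rfl, by omega⟩, if_pos (le_refl _)]
          unfold M at *
          rw [hD, if_pos ha]
          omega
        · rw [if_neg (by tauto), hCv j hj]
          split_ifs <;> first | rfl | omega
    · -- no set: either arr[i] ≤ arr[i+1] or ups i > M (i+1)
      apply ih
      · omega
      · exact hCl
      · intro j hj
        by_cases hjk : j = i
        · subst hjk
          rw [hCi, if_pos (le_refl _)]
          unfold M at *
          by_cases ha : arr.getD j 0 > arr.getD (j + 1) 0
          · have hU1 : (ups arr).getD (j + 1) 0 = 1 := by rw [hU, if_neg (by omega)]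
            have hle : ¬ ((ups arr).getD j 0 ≤ max ((ups arr).getD (j+1) 0) ((downs arr).getD (j+1) 0)) := by
              tauto
            rw [hD, if_pos ha]
            omega
          · rw [hD, if_neg ha]
            omega
        · rw [hCv j hj]
          split_ifs <;> first | rfl | omega
lemma a_eq_S (arr : List Int) : compute_fair_bonus arr = S arr := by
  match arr with
  | [] => simp [compute_fair_bonus, S, ups, downs]
  | [x] => simp [compute_fair_bonus, S, ups, downs, upsGo, desc]
  | a0 :: a1 :: rest =>
    have hn : 2 ≤ (a0 :: a1 :: rest).length := by simp
    set arr := a0 :: a1 :: rest with harr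
    have hlen : ¬ (((arr.length : Int)) < 2) := by
      rw [harr]; simp only [List.length_cons]; push_cast; omega
    have hne : arr ≠ [] := by simp [harr]
    unfold compute_fair_bonus
    rw [if_neg hlen]
    show (pass2Fold arr (pass1Fold arr (arr.length : Int)) ((arr.length : Int) - 1)).sum = S arr
    obtain ⟨h1l, h1v⟩ := pass1_invariant arr arr.length (by omega) (le_refl _)
    have hcast : ((arr.length : Int) - 1) = ((arr.length - 1 : Nat) : Int) := by
      have : 1 ≤ arr.length := by omega
      omega
    rw [hcast]
    have hlast : (downs arr).getD (arr.length - 1) 0 = 1 := downs_getD_last arr hne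
    obtain ⟨h2l, h2v⟩ := pass2_invariant arr (arr.length - 1) (pass1Fold arr (arr.length : Int))
      (by omega) h1l (by
        intro j hj
        rw [h1v j hj, if_pos hj]
        split_ifs with hij
        · have hj' : j = arr.length - 1 := by omega
          subst hj'
          unfold M
          have := ups_getD_pos arr (arr.length - 1) (by omega)
          omega
        · rfl)
    have hMeq : pass2Fold arr (pass1Fold arr (arr.length : Int)) ((arr.length - 1 : Nat) : Int) =
        List.zipWith max (ups arr) (downs arr) := by
      apply List.ext_getElem
      · rw [h2l, List.length_zipWith, length_ups, length_downs]; omega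
      · intro j hjl hjr
        have hj : j < arr.length := by omega
        rw [List.getElem_zipWith, ← List.getD_eq_getElem _ 0 hjl, h2v j hj]
        unfold M
        rw [List.getD_eq_getElem _ 0 (by rw [length_ups]; omega),
          List.getD_eq_getElem _ 0 (by rw [length_downs]; omega)]
    rw [hMeq, S]

-- ===== VERDICT (by name: the statement is the Claim_ definition above) =====
theorem compute_fair_bonus_spec : Claim_equal_compute_fair_bonus := by
  intro arr _
  unfold Spec_compute_fair_bonus
  rw [a_eq_S, alt_eq_S]
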